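-- pv_equiv track=rewrite | github.com/0x9576/pspy | P92344.py | solution
-- ===== SOURCE A (Python) =====
-- def solution(board, skill):
--     answer = 0
--     # borad보다 행,열이 1만큼 큰 배열 생성
--     arr = [[0 for c in range(len(board[0])+1)] for r in range(len(board)+1)]
--     for s in skill:
--         point(arr, s)
--     # 가중합 만들기
--     cal(arr)
--     # 두개의 배열합을 board에 저장
--     for i in range(len(arr)-1):
--         for j in range(len(arr[0])-1):
--             board[i][j] += arr[i][j]
--     for b_list in board:
--         for b in b_list:
--             if b > 0:
--                 answer += 1
--     return answer
--
-- def point(arr, skill):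
--     # 배열의 특정 부분만을 미리 지정 후 나중에 계산
--     # 가중합을 구하면 구하고자 하는 배열이 나온다.
--     if skill[0] == 1:
--         skill[5] = -skill[5]
--     arr[skill[1]][skill[2]] += skill[5]
--     arr[skill[1]][skill[4] + 1] -= skill[5]
--     arr[skill[3]+1][skill[2]] -= skill[5]
--     arr[skill[3]+1][skill[4] + 1] += skill[5]
--
-- def cal(arr):
--     # 가중합 계산
--     # 왼쪽에서 오른쪽으로 가중합
--     for i in range(0, len(arr)):
--         for j in range(1, len(arr[0])):
--             arr[i][j] += arr[i][j-1]
--     # 위에서 아래로 가중합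
--     for j in range(0, len(arr[0])):
--         for i in range(1, len(arr)):
--             arr[i][j] += arr[i-1][j]
-- ===== SOURCE B (Python) =====
-- def solution(board, skill):
--     # Direct rectangle application instead of A's difference array + prefix sums.
--     # Return-value equivalent; mutates board in place like A, but does not negate
--     # skill[5] in place for type-1 skills (A does).
--     for s in skill:
--         v = -s[5] if s[0] == 1 else s[5]
--         for i in range(s[1], s[3] + 1):
--             row = board[i]
--             for j in range(s[2], s[4] + 1):
--                 row[j] += v
--     return sum(1 for row in board for x in row if x > 0)
-- ===== Notes on version B (the rewrite author's own statement) =====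
-- stated objective: simpler
-- what changed: Replaces A's 2D difference-array with four-corner updates plus two prefix-sum passes and a merge loop by directly adding each skill's value over its rectangle and counting positives in one scan.
-- outside the precondition, e.g. on solution([[1], [1], [1]], [[0, 2, 0, 0, 0, 1]]): A returns 2, B returns 3; on solution([[1, 1, 1]], [[0, 0, 2, 0, 0, 1]]): A returns 2, B returns 3
import Mathlib
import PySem

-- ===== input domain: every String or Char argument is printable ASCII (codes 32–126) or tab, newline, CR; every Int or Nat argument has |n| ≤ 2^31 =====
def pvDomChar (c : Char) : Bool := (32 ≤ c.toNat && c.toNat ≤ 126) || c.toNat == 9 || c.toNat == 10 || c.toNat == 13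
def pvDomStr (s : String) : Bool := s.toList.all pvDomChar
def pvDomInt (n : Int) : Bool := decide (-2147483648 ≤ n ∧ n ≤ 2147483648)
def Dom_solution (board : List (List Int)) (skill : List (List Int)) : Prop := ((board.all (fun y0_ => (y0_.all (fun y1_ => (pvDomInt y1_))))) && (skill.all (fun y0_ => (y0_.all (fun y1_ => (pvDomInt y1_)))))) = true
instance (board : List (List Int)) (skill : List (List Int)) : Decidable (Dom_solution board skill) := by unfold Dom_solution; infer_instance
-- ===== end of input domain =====

-- B replaces A's 2D difference array (four-corner updates + two prefix-sum passes + merge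
-- loop) by adding each skill's value directly over its rectangle and counting positives in
-- one scan. Equivalence is about the RETURN value: A also negates skill[5] in place for
-- type-1 skills and both mutate board in place; B does not mutate skill.

-- ===== PORT A =====
-- arr[i][j] += v; on Pre_ every index is nonnegative and in range, where .toNat is exact
-- (Python would wrap negative indices; Pre_ admits none).
def pvAdd2 (arr : List (List Int)) (i j v : Int) : List (List Int) :=
  arr.modify i.toNat (fun row => row.modify j.toNat (· + v))

-- point(arr, skill); 'skill[5] = -skill[5]' is folded into the value v that A reads back
-- (return-value equivalence; the in-place negation of skill[5] is a side effect only).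
-- skill entries are read with getD; Pre_ guarantees length ≥ 6, where this is exact.
def pvPoint (arr : List (List Int)) (s : List Int) : List (List Int) :=
  let v := if s.getD 0 0 = 1 then -(s.getD 5 0) else s.getD 5 0
  pvAdd2 (pvAdd2 (pvAdd2 (pvAdd2 arr (s.getD 1 0) (s.getD 2 0) v)
      (s.getD 1 0) (s.getD 4 0 + 1) (-v))
      (s.getD 3 0 + 1) (s.getD 2 0) (-v))
      (s.getD 3 0 + 1) (s.getD 4 0 + 1) v

-- cal's first pass: 'for j in range(1, w): arr[i][j] += arr[i][j-1]' scans a row left to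
-- right, each cell becoming the running sum; pvRowScan is that in-place pass.
def pvRowScan (acc : Int) : List Int → List Int
  | [] => []
  | x :: xs => (acc + x) :: pvRowScan (acc + x) xs

-- cal's second pass: 'for i in range(1, h): arr[i][j] += arr[i-1][j]' adds the (already
-- updated) previous row into each row, top to bottom.
def pvColScan : List Int → List (List Int) → List (List Int)
  | _, [] => []
  | prev, r :: rs => (List.zipWith (· + ·) prev r) :: pvColScan (List.zipWith (· + ·) prev r) rs

def pvCal (arr : List (List Int)) : List (List Int) :=
  match arr.map (pvRowScan 0) with
  | [] => []
  | r :: rs => r :: pvColScan r rs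

-- 'for j in range(m): board[i][j] += arr[i][j]' on one row (m ≤ len(row), m ≤ len(a) on Pre_)
def pvAddPrefix : Nat → List Int → List Int → List Int
  | 0, row, _ => row
  | _+1, row, [] => row
  | _+1, [], _ => []
  | k+1, x :: xs, a :: as => (x + a) :: pvAddPrefix k xs as

def solution (board : List (List Int)) (skill : List (List Int)) : Int :=
  let n := board.length
  let m := (board.headD []).length      -- len(board[0]); board ≠ [] on Pre_
  let arr0 := List.replicate (n+1) (List.replicate (m+1) (0:Int))
  let arr2 := pvCal (skill.foldl pvPoint arr0)
  let board' := List.zipWith (pvAddPrefix m) board arr2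
  board'.foldl (fun acc r => r.foldl (fun a b => if b > 0 then a + 1 else a) acc) 0

-- ===== PORT B =====
-- inner 'for j in range(s[2], s[4]+1): row[j] += v'
def pvBump (v j2 j4 : Int) (row : List Int) : List Int :=
  (PySem.List.pyRange j2 (j4+1) 1).foldl (fun r j => r.modify j.toNat (· + v)) row

-- one skill: 'for i in range(s[1], s[3]+1):' bump board[i] over the column range
def pvApplySkill (g : List (List Int)) (s : List Int) : List (List Int) :=
  let v := if s.getD 0 0 = 1 then -(s.getD 5 0) else s.getD 5 0
  (PySem.List.pyRange (s.getD 1 0) (s.getD 3 0 + 1) 1).foldl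
    (fun g' i => g'.modify i.toNat (pvBump v (s.getD 2 0) (s.getD 4 0))) g

def solution_alt (board : List (List Int)) (skill : List (List Int)) : Int :=
  let g := skill.foldl pvApplySkill board
  (((g.map (fun row => row.countP (fun x => decide (0 < x)))).sum : Nat) : Int)

-- ===== PRECONDITION & SPEC =====
-- Pre_ excludes (a) inputs where A raises: empty board, a row shorter than board[0], or a
-- skill entry with fewer than 6 values or an index outside the (n+1)×(m+1) diff array; and
-- (b) inputs A returns on only by accident of its implementation, outside the problem's
-- contract of nonnegative top-left-to-bottom-right rectangles: negative in-range indices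
-- (Python wraparound) and reversed bounds (s[1]>s[3] or s[2]>s[4]), where A's difference
-- array writes -v into cells outside the (empty) rectangle.
def Pre_solution (board : List (List Int)) (skill : List (List Int)) : Prop :=
  board ≠ [] ∧
  (∀ row ∈ board, (board.headD []).length ≤ row.length) ∧
  (∀ s ∈ skill, 6 ≤ s.length ∧
    0 ≤ s.getD 1 0 ∧ s.getD 1 0 ≤ s.getD 3 0 ∧ s.getD 3 0 < (board.length : Int) ∧
    0 ≤ s.getD 2 0 ∧ s.getD 2 0 ≤ s.getD 4 0 ∧ s.getD 4 0 < ((board.headD []).length : Int))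
instance (board : List (List Int)) (skill : List (List Int)) : Decidable (Pre_solution board skill) := by
  unfold Pre_solution; infer_instance

def pvWitness_solution : List (List Int) × List (List Int) :=
  ([[1,-1],[0,2]], [[1,0,0,1,1,3],[0,0,0,0,0,2]])

def Spec_solution (board : List (List Int)) (skill : List (List Int)) (out : Int) : Prop := out = solution_alt board skill
instance (board : List (List Int)) (skill : List (List Int)) (out : Int) : Decidable (Spec_solution board skill out) := by unfold Spec_solution; infer_instance

-- ===== CLAIM (what is proved, stated in full; the proofs are below) =====
def Claim_equal_solution : Prop := ∀ (board : List (List Int)) (skill : List (List Int)), Dom_solution board skill → Pre_solution board skill → Spec_solution board skill (solution board skill)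

-- ===== LEMMAS AND PROOFS =====

-- cell view of a grid
def pvG (g : List (List Int)) (i j : Nat) : Int := (g.getD i []).getD j 0

-- rectangle contribution of one skill, and the total over all skills
def pvVal (s : List Int) : Int := if s.getD 0 0 = 1 then -(s.getD 5 0) else s.getD 5 0

def pvRect (s : List Int) (i j : Nat) : Int :=
  if s.getD 1 0 ≤ (i:Int) ∧ (i:Int) ≤ s.getD 3 0 ∧ s.getD 2 0 ≤ (j:Int) ∧ (j:Int) ≤ s.getD 4 0
  then pvVal s else 0

def pvS (skill : List (List Int)) (i j : Nat) : Int := (skill.map (fun s => pvRect s i j)).sum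

-- four-corner delta of one skill
def pvDelta (s : List Int) (i j : Nat) : Int :=
  pvVal s * ((if s.getD 1 0 = (i:Int) then 1 else 0) - (if s.getD 3 0 + 1 = (i:Int) then 1 else 0))
          * ((if s.getD 2 0 = (j:Int) then 1 else 0) - (if s.getD 4 0 + 1 = (j:Int) then 1 else 0))

lemma pv_getD_modify {α : Type} (l : List α) (i : Nat) (f : α → α) (j : Nat) (d : α) :
    (l.modify i f).getD j d = if i = j ∧ j < l.length then f (l.getD j d) else l.getD j d := by
  by_cases hj : j < l.length
  · rw [List.getD_eq_getElem _ _ (by simpa using hj), List.getD_eq_getElem _ _ hj,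
      List.getElem_modify]
    by_cases hij : i = j
    · simp [hij, hj]
    · simp [hij]
  · rw [List.getD_eq_default _ _ (by simpa using Nat.le_of_not_lt hj),
      List.getD_eq_default _ _ (Nat.le_of_not_lt hj), if_neg (by tauto)]

lemma pvAdd2_get (g : List (List Int)) (a b v : Int) (i j : Nat)
    (ha : 0 ≤ a) (hb : 0 ≤ b) :
    pvG (pvAdd2 g a b v) i j =
      pvG g i j + (if a = (i:Int) ∧ b = (j:Int) ∧ i < g.length ∧ j < (g.getD i []).length then v else 0) := by
  unfold pvG pvAdd2
  rw [pv_getD_modify]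
  by_cases h1 : a.toNat = i ∧ i < g.length
  · rw [if_pos h1, pv_getD_modify]
    by_cases h2 : b.toNat = j ∧ j < (g.getD i []).length
    · rw [if_pos h2, if_pos ⟨by omega, by omega, h1.2, h2.2⟩]
    · rw [if_neg h2, if_neg (by omega), add_zero]
  · rw [if_neg h1, if_neg (by omega), add_zero]

lemma pvAdd2_length (g : List (List Int)) (a b v : Int) : (pvAdd2 g a b v).length = g.length := by
  simp [pvAdd2]

lemma pvAdd2_row_length (g : List (List Int)) (a b v : Int) (i : Nat) :
    ((pvAdd2 g a b v).getD i []).length = (g.getD i []).length := by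
  unfold pvAdd2
  rw [pv_getD_modify]
  split_ifs with h
  · rw [← h.1, List.length_modify]
  · rfl

-- shape predicate: R rows, each of length C
def pvWF (R C : Nat) (g : List (List Int)) : Prop :=
  g.length = R ∧ ∀ i, i < R → (g.getD i []).length = C

lemma pvAdd2_wf {R C : Nat} {g : List (List Int)} (h : pvWF R C g) (a b v : Int) :
    pvWF R C (pvAdd2 g a b v) := by
  refine ⟨by rw [pvAdd2_length]; exact h.1, fun i hi => ?_⟩
  rw [pvAdd2_row_length]; exact h.2 i hi

lemma pvPoint_wf {R C : Nat} {g : List (List Int)} (h : pvWF R C g) (s : List Int) :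
    pvWF R C (pvPoint g s) := by
  unfold pvPoint
  exact pvAdd2_wf (pvAdd2_wf (pvAdd2_wf (pvAdd2_wf h _ _ _) _ _ _) _ _ _) _ _ _

lemma pvAdd2_get' {n m : Nat} {g : List (List Int)} (hwf : pvWF (n+1) (m+1) g)
    (a b v : Int) (i j : Nat) (ha : 0 ≤ a) (hb : 0 ≤ b) (hi : i < n+1) (hj : j < m+1) :
    pvG (pvAdd2 g a b v) i j = pvG g i j + (if a = (i:Int) ∧ b = (j:Int) then v else 0) := by
  have h1 : i < g.length := by rw [hwf.1]; omega
  have h2 : j < (g.getD i []).length := by rw [hwf.2 i hi]; omega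
  have hc : (a = (i:Int) ∧ b = (j:Int) ∧ i < g.length ∧ j < (g.getD i []).length) ↔
      (a = (i:Int) ∧ b = (j:Int)) := by tauto
  rw [pvAdd2_get g a b v i j ha hb]
  simp only [hc]

lemma pvPoint_get {n m : Nat} {g : List (List Int)} (hwf : pvWF (n+1) (m+1) g)
    (s : List Int)
    (h1 : 0 ≤ s.getD 1 0) (h13 : s.getD 1 0 ≤ s.getD 3 0) (h3 : s.getD 3 0 < (n:Int))
    (h2 : 0 ≤ s.getD 2 0) (h24 : s.getD 2 0 ≤ s.getD 4 0) (h4 : s.getD 4 0 < (m:Int))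
    (i j : Nat) (hi : i < n+1) (hj : j < m+1) :
    pvG (pvPoint g s) i j = pvG g i j + pvDelta s i j := by
  have w1 := pvAdd2_wf hwf (s.getD 1 0) (s.getD 2 0) (pvVal s)
  have w2 := pvAdd2_wf w1 (s.getD 1 0) (s.getD 4 0 + 1) (-(pvVal s))
  have w3 := pvAdd2_wf w2 (s.getD 3 0 + 1) (s.getD 2 0) (-(pvVal s))
  show pvG (pvAdd2 (pvAdd2 (pvAdd2 (pvAdd2 g (s.getD 1 0) (s.getD 2 0) (pvVal s))
      (s.getD 1 0) (s.getD 4 0 + 1) (-(pvVal s)))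
      (s.getD 3 0 + 1) (s.getD 2 0) (-(pvVal s)))
      (s.getD 3 0 + 1) (s.getD 4 0 + 1) (pvVal s)) i j = _
  rw [pvAdd2_get' w3 _ _ _ i j (by omega) (by omega) hi hj,
    pvAdd2_get' w2 _ _ _ i j (by omega) (by omega) hi hj,
    pvAdd2_get' w1 _ _ _ i j (by omega) (by omega) hi hj,
    pvAdd2_get' hwf _ _ _ i j (by omega) (by omega) hi hj]
  unfold pvDelta
  split_ifs <;> (try omega) <;> ring

lemma pvFold_point_wf {n m : Nat} {g : List (List Int)} (h : pvWF (n+1) (m+1) g)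
    (L : List (List Int)) : pvWF (n+1) (m+1) (L.foldl pvPoint g) := by
  induction L generalizing g with
  | nil => exact h
  | cons s L ih => exact ih (pvPoint_wf h s)

lemma pvFold_point_get {n m : Nat} (L : List (List Int)) (g : List (List Int))
    (hwf : pvWF (n+1) (m+1) g)
    (hL : ∀ s ∈ L, 0 ≤ s.getD 1 0 ∧ s.getD 1 0 ≤ s.getD 3 0 ∧ s.getD 3 0 < (n:Int) ∧
      0 ≤ s.getD 2 0 ∧ s.getD 2 0 ≤ s.getD 4 0 ∧ s.getD 4 0 < (m:Int))
    (i j : Nat) (hi : i < n+1) (hj : j < m+1) :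
    pvG (L.foldl pvPoint g) i j = pvG g i j + (L.map (fun s => pvDelta s i j)).sum := by
  induction L generalizing g with
  | nil => simp
  | cons s L ih =>
    obtain ⟨a1, a13, a3, a2, a24, a4⟩ := hL s (List.mem_cons_self ..)
    rw [List.foldl_cons, ih (pvPoint g s) (pvPoint_wf hwf s) (fun t ht => hL t (List.mem_cons_of_mem _ ht)),
      pvPoint_get hwf s a1 a13 a3 a2 a24 a4 i j hi hj]
    simp; ring

lemma pvRowScan_length (acc : Int) (r : List Int) : (pvRowScan acc r).length = r.length := by
  induction r generalizing acc with
  | nil => rfl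
  | cons x xs ih => simp [pvRowScan, ih]

lemma pvRowScan_get (r : List Int) (acc : Int) (j : Nat) (hj : j < r.length) :
    (pvRowScan acc r).getD j 0 = acc + ∑ k ∈ Finset.range (j+1), r.getD k 0 := by
  induction r generalizing acc j with
  | nil => simp at hj
  | cons x xs ih =>
    cases j with
    | zero => simp [pvRowScan, Finset.sum_range_one]
    | succ j =>
      have hj' : j < xs.length := by simpa using hj
      show (pvRowScan (acc + x) xs).getD j 0 = _
      rw [ih (acc + x) j hj', Finset.sum_range_succ' (fun k => (x::xs).getD k 0) (j+1)]
      simp only [List.getD_cons_succ, List.getD_cons_zero]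
      ring

lemma pvColScan_length (p : List Int) (L : List (List Int)) :
    (pvColScan p L).length = L.length := by
  induction L generalizing p with
  | nil => rfl
  | cons r rs ih => simp [pvColScan, ih]

lemma pvColScan_row_length (w : Nat) (L : List (List Int)) (p : List Int)
    (hp : p.length = w) (hL : ∀ i, i < L.length → (L.getD i []).length = w)
    (i : Nat) (hi : i < L.length) :
    ((pvColScan p L).getD i []).length = w := by
  induction L generalizing p i with
  | nil => simp at hi
  | cons r rs ih =>
    have hr : r.length = w := by simpa using hL 0 (by simp)
    cases i with
    | zero => simp [pvColScan, List.length_zipWith, hp, hr]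
    | succ i =>
      have hi' : i < rs.length := by simpa using hi
      show ((pvColScan (List.zipWith (· + ·) p r) rs).getD i []).length = w
      exact ih _ (by simp [List.length_zipWith, hp, hr])
        (fun k hk => by simpa using hL (k+1) (by simpa using hk)) i hi'

lemma pv_zip_getD (p r : List Int) (j : Nat) (hp : j < p.length) (hr : j < r.length) :
    (List.zipWith (· + ·) p r).getD j 0 = p.getD j 0 + r.getD j 0 := by
  rw [List.getD_eq_getElem _ _ (by simp [List.length_zipWith]; omega),
    List.getD_eq_getElem _ _ hp, List.getD_eq_getElem _ _ hr, List.getElem_zipWith]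

lemma pvColScan_get (w : Nat) (L : List (List Int)) (p : List Int)
    (hp : p.length = w) (hL : ∀ i, i < L.length → (L.getD i []).length = w)
    (i j : Nat) (hi : i < L.length) (hj : j < w) :
    pvG (pvColScan p L) i j = p.getD j 0 + ∑ k ∈ Finset.range (i+1), pvG L k j := by
  induction L generalizing p i with
  | nil => simp at hi
  | cons r rs ih =>
    have hr : r.length = w := by simpa using hL 0 (by simp)
    cases i with
    | zero =>
      show (List.zipWith (· + ·) p r).getD j 0 = _
      rw [pv_zip_getD p r j (by omega) (by omega)]
      simp [pvG, Finset.sum_range_one]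
    | succ i =>
      have hi' : i < rs.length := by simpa using hi
      show pvG (pvColScan (List.zipWith (· + ·) p r) rs) i j = _
      rw [ih _ (by simp [List.length_zipWith, hp, hr])
        (fun k hk => by simpa using hL (k+1) (by simpa using hk)) i hi',
        pv_zip_getD p r j (by omega) (by omega),
        Finset.sum_range_succ' (fun k => pvG (r :: rs) k j) (i+1)]
      have : ∀ k, pvG (r :: rs) (k+1) j = pvG rs k j := fun k => rfl
      simp only [this]
      have h0 : pvG (r :: rs) 0 j = r.getD j 0 := rfl
      rw [h0]
      ring

lemma pvCal_length (g : List (List Int)) : (pvCal g).length = g.length := by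
  unfold pvCal
  cases h : g.map (pvRowScan 0) with
  | nil =>
    rw [List.map_eq_nil_iff] at h
    simp [h]
  | cons r rs =>
    have hl := congrArg List.length h
    simp only [List.length_map, List.length_cons] at hl
    simp [pvColScan_length, hl]

lemma pvCal_row_length {R C : Nat} {g : List (List Int)} (hwf : pvWF R C g)
    (i : Nat) (hi : i < R) : ((pvCal g).getD i []).length = C := by
  cases g with
  | nil => exact absurd (hwf.1 ▸ hi) (by simp)
  | cons g0 gs =>
    have hlen := hwf.1
    simp only [List.length_cons] at hlen
    have h0 : (pvRowScan 0 g0).length = C := by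
      rw [pvRowScan_length]
      simpa using hwf.2 0 (by omega)
    have hmap : ∀ k, k < gs.length → ((gs.map (pvRowScan 0)).getD k []).length = C := by
      intro k hk
      rw [List.getD_eq_getElem _ _ (by simpa using hk), List.getElem_map, pvRowScan_length]
      have := hwf.2 (k+1) (by omega)
      rwa [List.getD_cons_succ, List.getD_eq_getElem _ _ hk] at this
    show ((match (g0 :: gs).map (pvRowScan 0) with
      | [] => []
      | r :: rs => r :: pvColScan r rs).getD i []).length = C
    simp only [List.map_cons]
    cases i with
    | zero => simpa using h0
    | succ i =>
      rw [List.getD_cons_succ]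
      exact pvColScan_row_length C _ _ h0 (by simpa using hmap) i (by simp; omega)

lemma pvCal_get {R C : Nat} {g : List (List Int)} (hwf : pvWF R C g)
    (i j : Nat) (hi : i < R) (hj : j < C) :
    pvG (pvCal g) i j = ∑ k ∈ Finset.range (i+1), ∑ l ∈ Finset.range (j+1), pvG g k l := by
  cases g with
  | nil => exact absurd (hwf.1 ▸ hi) (by simp)
  | cons g0 gs =>
    have hlen := hwf.1
    simp only [List.length_cons] at hlen
    have hg0 : g0.length = C := by simpa using hwf.2 0 (by omega)
    have h0 : (pvRowScan 0 g0).length = C := by rw [pvRowScan_length]; exact hg0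
    have hmap : ∀ k, k < gs.length → ((gs.map (pvRowScan 0)).getD k []).length = C := by
      intro k hk
      rw [List.getD_eq_getElem _ _ (by simpa using hk), List.getElem_map, pvRowScan_length]
      have := hwf.2 (k+1) (by omega)
      rwa [List.getD_cons_succ, List.getD_eq_getElem _ _ hk] at this
    have hmapget : ∀ k, k < gs.length → ∀ l : Nat,
        ((gs.map (pvRowScan 0)).getD k []) = pvRowScan 0 (gs.getD k []) := by
      intro k hk l
      rw [List.getD_eq_getElem _ _ (by simpa using hk), List.getElem_map,
        List.getD_eq_getElem _ _ hk]
    show pvG (match (g0 :: gs).map (pvRowScan 0) with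
      | [] => []
      | r :: rs => r :: pvColScan r rs) i j = _
    simp only [List.map_cons]
    cases i with
    | zero =>
      show (pvRowScan 0 g0).getD j 0 = _
      rw [pvRowScan_get g0 0 j (by omega), Finset.sum_range_one]
      simp [pvG]
    | succ i =>
      show pvG (pvColScan (pvRowScan 0 g0) (gs.map (pvRowScan 0))) i j = _
      rw [pvColScan_get C _ _ h0 (by simpa using hmap) i j (by simp; omega) hj,
        pvRowScan_get g0 0 j (by omega),
        Finset.sum_range_succ' (fun k => ∑ l ∈ Finset.range (j+1), pvG (g0 :: gs) k l) (i+1)]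
      have hterm : ∀ k, k < i+1 → pvG (gs.map (pvRowScan 0)) k j =
          ∑ l ∈ Finset.range (j+1), pvG (g0 :: gs) (k+1) l := by
        intro k hk
        have hkgs : k < gs.length := by omega
        show ((gs.map (pvRowScan 0)).getD k []).getD j 0 = _
        rw [hmapget k hkgs 0, pvRowScan_get _ 0 j ?hl]
        case hl =>
          have := hwf.2 (k+1) (by omega)
          rw [List.getD_cons_succ] at this
          omega
        simp [pvG]
      rw [Finset.sum_congr rfl (fun k hk => hterm k (Finset.mem_range.mp hk))]
      have : ∀ l, pvG (g0 :: gs) 0 l = g0.getD l 0 := fun l => rfl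
      simp only [this]
      ring

lemma pv_sum_ind (a : Int) (t : Nat) :
    ∑ k ∈ Finset.range (t+1), (if a = (k:Int) then (1:Int) else 0) =
      if 0 ≤ a ∧ a ≤ (t:Int) then 1 else 0 := by
  induction t with
  | zero => rw [Finset.sum_range_one]; push_cast; split_ifs <;> omega
  | succ t ih =>
    rw [Finset.sum_range_succ, ih]
    split_ifs <;> push_cast at * <;> omega

lemma pvDelta_box (s : List Int)
    (h1 : 0 ≤ s.getD 1 0) (h13 : s.getD 1 0 ≤ s.getD 3 0)
    (h2 : 0 ≤ s.getD 2 0) (h24 : s.getD 2 0 ≤ s.getD 4 0)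
    (i j : Nat) :
    ∑ k ∈ Finset.range (i+1), ∑ l ∈ Finset.range (j+1), pvDelta s k l = pvRect s i j := by
  have e1 : ∑ k ∈ Finset.range (i+1), ∑ l ∈ Finset.range (j+1), pvDelta s k l =
      (∑ k ∈ Finset.range (i+1),
        ((if s.getD 1 0 = (k:Int) then (1:Int) else 0) - (if s.getD 3 0 + 1 = (k:Int) then 1 else 0))) *
      (∑ l ∈ Finset.range (j+1),
        ((if s.getD 2 0 = (l:Int) then (1:Int) else 0) - (if s.getD 4 0 + 1 = (l:Int) then 1 else 0))) *
      pvVal s := by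
    rw [Finset.sum_mul_sum, Finset.sum_mul]
    refine Finset.sum_congr rfl (fun k _ => ?_)
    rw [Finset.sum_mul]
    refine Finset.sum_congr rfl (fun l _ => ?_)
    unfold pvDelta
    ring
  rw [e1]
  rw [Finset.sum_sub_distrib, Finset.sum_sub_distrib, pv_sum_ind, pv_sum_ind, pv_sum_ind, pv_sum_ind]
  unfold pvRect
  split_ifs <;> (try omega) <;> ring

-- exchange a list sum with the two finite sums
lemma pv_sum_swap (L : List (List Int)) (F : List Int → Nat → Nat → Int) (a b : Nat) :
    ∑ k ∈ Finset.range a, ∑ l ∈ Finset.range b, (L.map (fun s => F s k l)).sum =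
      (L.map (fun s => ∑ k ∈ Finset.range a, ∑ l ∈ Finset.range b, F s k l)).sum := by
  induction L with
  | nil => simp
  | cons s L ih => simp [Finset.sum_add_distrib, ih]

lemma pvS_zero_of_ge (skill : List (List Int)) (m : Nat)
    (hL : ∀ s ∈ skill, s.getD 4 0 < (m:Int)) (i j : Nat) (hj : m ≤ j) :
    pvS skill i j = 0 := by
  apply List.sum_eq_zero
  intro x hx
  simp only [List.mem_map] at hx
  obtain ⟨s, hs, rfl⟩ := hx
  have := hL s hs
  unfold pvRect
  rw [if_neg]; omega

-- ===== B-side lemmas =====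
lemma pv_foldl_modify_length {α β : Type} (f : β → Nat) (h : β → α → α) (L : List β) (l : List α) :
    (L.foldl (fun r x => r.modify (f x) (h x)) l).length = l.length := by
  induction L generalizing l with
  | nil => rfl
  | cons x L ih => simp [ih]

lemma pvBump_length (v j2 j4 : Int) (row : List Int) : (pvBump v j2 j4 row).length = row.length := by
  unfold pvBump
  exact pv_foldl_modify_length (fun j : Int => j.toNat) (fun _ => (· + v)) _ row

lemma pvBump_fold_get_aux (v b : Int) : ∀ (fuel : Nat) (a : Int) (row : List Int) (j : Nat),
    (b - a).toNat ≤ fuel → 0 ≤ a → b ≤ (row.length : Int) →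
    ((PySem.List.pyRange a b 1).foldl (fun r x => r.modify x.toNat (· + v)) row).getD j 0 =
      row.getD j 0 + (if a ≤ (j:Int) ∧ (j:Int) < b then v else 0) := by
  intro fuel
  induction fuel with
  | zero =>
    intro a row j hf ha hb
    rw [PySem.List.pyRange_one_eq_nil (by omega), List.foldl_nil, if_neg (by omega), add_zero]
  | succ fuel ih =>
    intro a row j hf ha hb
    by_cases hab : a < b
    · rw [PySem.List.pyRange_one_cons hab, List.foldl_cons,
        ih (a+1) (row.modify a.toNat (· + v)) j (by omega) (by omega)
          (by rw [List.length_modify]; exact hb),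
        pv_getD_modify]
      split_ifs <;> omega
    · rw [PySem.List.pyRange_one_eq_nil (by omega), List.foldl_nil, if_neg (by omega), add_zero]

lemma pvBump_fold_get (v : Int) (b : Int) : ∀ (a : Int) (row : List Int) (j : Nat),
    0 ≤ a → b ≤ (row.length : Int) →
    ((PySem.List.pyRange a b 1).foldl (fun r x => r.modify x.toNat (· + v)) row).getD j 0 =
      row.getD j 0 + (if a ≤ (j:Int) ∧ (j:Int) < b then v else 0) := by
  intro a row j ha hb
  exact pvBump_fold_get_aux v b ((b - a).toNat) a row j le_rfl ha hb

lemma pvBump_get (v j2 j4 : Int) (row : List Int) (j : Nat)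
    (h2 : 0 ≤ j2) (h4 : j4 < (row.length : Int)) :
    (pvBump v j2 j4 row).getD j 0 =
      row.getD j 0 + (if j2 ≤ (j:Int) ∧ (j:Int) ≤ j4 then v else 0) := by
  unfold pvBump
  rw [pvBump_fold_get v (j4+1) j2 row j h2 (by omega)]
  congr 1
  split_ifs <;> first | rfl | omega

lemma pvApplySkill_length (g : List (List Int)) (s : List Int) :
    (pvApplySkill g s).length = g.length := by
  unfold pvApplySkill
  exact pv_foldl_modify_length (fun i : Int => i.toNat)
    (fun _ => pvBump (if s.getD 0 0 = 1 then -(s.getD 5 0) else s.getD 5 0) (s.getD 2 0) (s.getD 4 0)) _ g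

lemma pv_foldl_modify_row_length (L : List Int) (g : List (List Int)) (F : List Int → List Int)
    (hF : ∀ r, (F r).length = r.length) (i : Nat) :
    ((L.foldl (fun g' x => g'.modify x.toNat F) g).getD i []).length = (g.getD i []).length := by
  induction L generalizing g with
  | nil => rfl
  | cons x L ih =>
    rw [List.foldl_cons, ih, pv_getD_modify]
    split_ifs with h
    · rw [hF]
    · rfl

lemma pvApplySkill_row_length (g : List (List Int)) (s : List Int) (i : Nat) :
    ((pvApplySkill g s).getD i []).length = (g.getD i []).length := by
  unfold pvApplySkill
  exact pv_foldl_modify_row_length _ g _ (fun r => pvBump_length _ _ _ r) i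

lemma pvApplyB_aux (V s2 s4 : Int) (hs2 : 0 ≤ s2) (b : Int) : ∀ (fuel : Nat) (a : Int)
    (g : List (List Int)) (i j : Nat),
    (b - a).toNat ≤ fuel → 0 ≤ a → b ≤ (g.length : Int) →
    (∀ k, k < g.length → s4 < ((g.getD k []).length : Int)) →
    pvG ((PySem.List.pyRange a b 1).foldl (fun g' x => g'.modify x.toNat (pvBump V s2 s4)) g) i j =
      pvG g i j + (if a ≤ (i:Int) ∧ (i:Int) < b ∧ s2 ≤ (j:Int) ∧ (j:Int) ≤ s4 then V else 0) := by
  intro fuel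
  induction fuel with
  | zero =>
    intro a g i j hf ha hb hr
    rw [PySem.List.pyRange_one_eq_nil (by omega), List.foldl_nil, if_neg (by omega), add_zero]
  | succ fuel ih =>
    intro a g i j hf ha hb hr
    by_cases hab : a < b
    · rw [PySem.List.pyRange_one_cons hab, List.foldl_cons,
        ih (a+1) (g.modify a.toNat (pvBump V s2 s4)) i j (by omega) (by omega)
          (by rw [List.length_modify]; exact hb) ?hrows]
      case hrows =>
        intro k hk
        rw [List.length_modify] at hk
        rw [pv_getD_modify]
        split_ifs with h
        · rw [pvBump_length]; exact hr k hk
        · exact hr k hk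
      unfold pvG
      rw [pv_getD_modify]
      by_cases h : a.toNat = i ∧ i < g.length
      · rw [if_pos h, pvBump_get V s2 s4 _ j hs2 (hr i h.2)]
        split_ifs <;> omega
      · rw [if_neg h]
        split_ifs <;> omega
    · rw [PySem.List.pyRange_one_eq_nil (by omega), List.foldl_nil, if_neg (by omega), add_zero]

lemma pvApplySkill_get (g : List (List Int)) (s : List Int)
    (h1 : 0 ≤ s.getD 1 0) (h3 : s.getD 3 0 < (g.length : Int))
    (h2 : 0 ≤ s.getD 2 0)
    (hrow : ∀ i, i < g.length → s.getD 4 0 < ((g.getD i []).length : Int))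
    (i j : Nat) :
    pvG (pvApplySkill g s) i j = pvG g i j + pvRect s i j := by
  have main := pvApplyB_aux (pvVal s) (s.getD 2 0) (s.getD 4 0) h2 (s.getD 3 0 + 1)
    ((s.getD 3 0 + 1 - s.getD 1 0).toNat) (s.getD 1 0) g i j le_rfl h1 (by omega) hrow
  show pvG ((PySem.List.pyRange (s.getD 1 0) (s.getD 3 0 + 1) 1).foldl
    (fun g' x => g'.modify x.toNat (pvBump (pvVal s) (s.getD 2 0) (s.getD 4 0))) g) i j = _
  rw [main]
  unfold pvRect
  congr 1
  split_ifs <;> first | rfl | omega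

lemma pvFoldB_get (skill : List (List Int)) (board g : List (List Int))
    (hlen : g.length = board.length)
    (hrows : ∀ i, i < g.length → (g.getD i []).length = (board.getD i []).length)
    (hL : ∀ s ∈ skill, 0 ≤ s.getD 1 0 ∧ s.getD 3 0 < (board.length : Int) ∧
      0 ≤ s.getD 2 0 ∧ (∀ i, i < board.length → s.getD 4 0 < ((board.getD i []).length : Int)))
    (i j : Nat) :
    pvG (skill.foldl pvApplySkill g) i j = pvG g i j + pvS skill i j := by
  induction skill generalizing g with
  | nil => simp [pvS]
  | cons s L ih =>
    obtain ⟨a1, a3, a2, a4⟩ := hL s (List.mem_cons_self ..)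
    rw [List.foldl_cons,
      ih (pvApplySkill g s) (by rw [pvApplySkill_length]; exact hlen)
        (fun k hk => by
          rw [pvApplySkill_row_length]
          exact hrows k (by rwa [pvApplySkill_length] at hk))
        (fun t ht => hL t (List.mem_cons_of_mem _ ht)),
      pvApplySkill_get g s a1 (by rw [hlen]; exact a3) a2
        (fun k hk => by rw [hrows k hk]; exact a4 k (by rwa [← hlen])) i j]
    unfold pvS
    simp only [List.map_cons, List.sum_cons]
    ring

lemma pvFoldB_length (skill : List (List Int)) (g : List (List Int)) :
    (skill.foldl pvApplySkill g).length = g.length := by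
  induction skill generalizing g with
  | nil => rfl
  | cons s L ih => rw [List.foldl_cons, ih, pvApplySkill_length]

lemma pvFoldB_row_length (skill : List (List Int)) (g : List (List Int)) (i : Nat) :
    ((skill.foldl pvApplySkill g).getD i []).length = (g.getD i []).length := by
  induction skill generalizing g with
  | nil => rfl
  | cons s L ih => rw [List.foldl_cons, ih, pvApplySkill_row_length]

-- ===== final-board lemmas =====
lemma pvAddPrefix_length : ∀ (k : Nat) (row a : List Int), (pvAddPrefix k row a).length = row.length := by
  intro k row a
  induction row generalizing k a with
  | nil => cases k <;> cases a <;> rfl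
  | cons x xs ih =>
    cases k with
    | zero => rfl
    | succ k =>
      cases a with
      | nil => rfl
      | cons y ys => simp [pvAddPrefix, ih]

lemma pvAddPrefix_get : ∀ (k : Nat) (row a : List Int) (j : Nat), k ≤ row.length → k ≤ a.length →
    (pvAddPrefix k row a).getD j 0 = row.getD j 0 + (if j < k then a.getD j 0 else 0) := by
  intro k row a j hr ha
  induction row generalizing k a j with
  | nil =>
    have hk : k = 0 := by simpa using hr
    subst hk
    simp [pvAddPrefix]
  | cons x xs ih =>
    cases k with
    | zero => simp [pvAddPrefix]
    | succ k =>
      cases a with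
      | nil => simp at ha
      | cons y ys =>
        cases j with
        | zero => simp [pvAddPrefix]
        | succ j =>
          show (pvAddPrefix k xs ys).getD j 0 = _
          rw [ih k ys j (by simpa using hr) (by simpa using ha),
            List.getD_cons_succ, List.getD_cons_succ]
          congr 1
          by_cases h : j < k
          · rw [if_pos h, if_pos (by omega)]
          · rw [if_neg h, if_neg (by omega)]

lemma pv_count_eq (E : List (List Int)) (acc : Int) :
    E.foldl (fun acc r => r.foldl (fun a b => if b > 0 then a + 1 else a) acc) acc =
      acc + (((E.map (fun row => row.countP (fun x => decide (0 < x)))).sum : Nat) : Int) := by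
  induction E generalizing acc with
  | nil => simp
  | cons r E ih =>
    rw [List.foldl_cons, ih]
    have h := PySem.List.foldl_count_if (fun b : Int => decide (0 < b)) r acc
    simp only [decide_eq_true_eq] at h
    rw [h]
    simp only [List.map_cons, List.sum_cons]
    push_cast
    ring

-- ===== VERDICT (by name: the statement is the Claim_ definition above) =====
theorem solution_spec : Claim_equal_solution := by
  unfold Claim_equal_solution
  intro board skill hdom hpre
  obtain ⟨hne, hrows, hsk⟩ := hpre
  unfold Spec_solution
  simp only [solution, solution_alt]
  have hEq : List.zipWith (pvAddPrefix (board.headD []).length) board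
      (pvCal ((skill.foldl pvPoint (List.replicate (board.length+1)
        (List.replicate ((board.headD []).length+1) (0:Int)))))) =
      skill.foldl pvApplySkill board := by
    have wf0 : pvWF (board.length+1) ((board.headD []).length+1)
        (List.replicate (board.length+1) (List.replicate ((board.headD []).length+1) (0:Int))) := by
      refine ⟨by simp, fun i hi => ?_⟩
      rw [List.getD_eq_getElem _ _ (by simpa using hi)]
      simp
    have wf1 := pvFold_point_wf wf0 skill
    have hrep : ∀ (t j : Nat), (List.replicate t (0:Int)).getD j 0 = 0 := by
      intro t j
      induction t generalizing j with
      | zero => simp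
      | succ t ih => cases j <;> simp [List.replicate]
    have hg0 : ∀ i j, pvG (List.replicate (board.length+1)
        (List.replicate ((board.headD []).length+1) (0:Int))) i j = 0 := by
      intro i j
      unfold pvG
      by_cases hi : i < board.length+1
      · rw [List.getD_eq_getElem (List.replicate (board.length+1)
            (List.replicate ((board.headD []).length+1) (0:Int))) [] (n := i)
            (by simpa using hi),
          List.getElem_replicate, hrep]
      · rw [List.getD_eq_default (List.replicate (board.length+1)
            (List.replicate ((board.headD []).length+1) (0:Int))) [] (n := i)
            (by simpa using Nat.le_of_not_lt hi)]
        simp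
    have hskA : ∀ s ∈ skill, 0 ≤ s.getD 1 0 ∧ s.getD 1 0 ≤ s.getD 3 0 ∧
        s.getD 3 0 < (board.length:Int) ∧ 0 ≤ s.getD 2 0 ∧ s.getD 2 0 ≤ s.getD 4 0 ∧
        s.getD 4 0 < ((board.headD []).length:Int) :=
      fun s hs => (hsk s hs).2
    have hrowlen : ∀ i, i < board.length → (board.headD []).length ≤ (board.getD i []).length := by
      intro i hi
      apply hrows
      rw [List.getD_eq_getElem _ _ hi]
      exact List.getElem_mem _
    have hAcell : ∀ i j, i < board.length+1 → j < (board.headD []).length+1 →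
        pvG (pvCal (skill.foldl pvPoint (List.replicate (board.length+1)
          (List.replicate ((board.headD []).length+1) (0:Int))))) i j = pvS skill i j := by
      intro i j hi hj
      rw [pvCal_get wf1 i j hi hj,
        Finset.sum_congr rfl (fun k hk => Finset.sum_congr rfl (fun l hl => by
          rw [pvFold_point_get skill _ wf0 hskA k l
            (by have := Finset.mem_range.mp hk; omega)
            (by have := Finset.mem_range.mp hl; omega), hg0, zero_add])),
        pv_sum_swap skill (fun s k l => pvDelta s k l) (i+1) (j+1)]
      unfold pvS
      refine congrArg List.sum (List.map_congr_left (fun s hs => ?_))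
      obtain ⟨a1, a13, a3, a2, a24, a4⟩ := hskA s hs
      exact pvDelta_box s a1 a13 a2 a24 i j
    have hLB : ∀ s ∈ skill, 0 ≤ s.getD 1 0 ∧ s.getD 3 0 < (board.length : Int) ∧
        0 ≤ s.getD 2 0 ∧ (∀ i, i < board.length →
          s.getD 4 0 < ((board.getD i []).length : Int)) := by
      intro s hs
      obtain ⟨a1, a13, a3, a2, a24, a4⟩ := hskA s hs
      exact ⟨a1, a3, a2, fun i hi => by have := hrowlen i hi; omega⟩
    have hBcell : ∀ i j, pvG (skill.foldl pvApplySkill board) i j =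
        pvG board i j + pvS skill i j :=
      pvFoldB_get skill board board rfl (fun _ _ => rfl) hLB
    have hcal_len : (pvCal (skill.foldl pvPoint (List.replicate (board.length+1)
        (List.replicate ((board.headD []).length+1) (0:Int))))).length = board.length + 1 := by
      rw [pvCal_length]; exact wf1.1
    apply List.ext_getElem
    · rw [List.length_zipWith, hcal_len, pvFoldB_length]
      omega
    · intro i h1 h2
      have hi : i < board.length := by
        rw [List.length_zipWith, hcal_len] at h1
        omega
      have hi1 : i < (pvCal (skill.foldl pvPoint (List.replicate (board.length+1)
          (List.replicate ((board.headD []).length+1) (0:Int))))).length := by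
        rw [hcal_len]; omega
      rw [List.getElem_zipWith]
      have hEBrow : (skill.foldl pvApplySkill board)[i] =
          (skill.foldl pvApplySkill board).getD i [] := by
        rw [List.getD_eq_getElem _ _ h2]
      have hrowB_len : ((skill.foldl pvApplySkill board).getD i []).length =
          (board.getD i []).length := pvFoldB_row_length skill board i
      have hArow_len : ((pvCal (skill.foldl pvPoint (List.replicate (board.length+1)
          (List.replicate ((board.headD []).length+1) (0:Int))))).getD i []).length =
          (board.headD []).length + 1 := pvCal_row_length wf1 i (by omega)
      have hbrow : board[i] = board.getD i [] := by rw [List.getD_eq_getElem _ _ hi]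
      have hcalrow : (pvCal (skill.foldl pvPoint (List.replicate (board.length+1)
          (List.replicate ((board.headD []).length+1) (0:Int)))))[i] =
          (pvCal (skill.foldl pvPoint (List.replicate (board.length+1)
          (List.replicate ((board.headD []).length+1) (0:Int))))).getD i [] := by
        rw [List.getD_eq_getElem _ _ hi1]
      apply List.ext_getElem
      · rw [hEBrow, hrowB_len, pvAddPrefix_length, hbrow]
      · intro j hj1 hj2
        have key : (pvAddPrefix ((board.headD []).length) board[i]
            (pvCal (skill.foldl pvPoint (List.replicate (board.length+1)
              (List.replicate ((board.headD []).length+1) (0:Int)))))[i]).getD j 0 =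
            ((skill.foldl pvApplySkill board)[i]).getD j 0 := by
          rw [hbrow, hcalrow, hEBrow,
            pvAddPrefix_get ((board.headD []).length) (board.getD i []) _ j
              (hrowlen i hi) (by rw [hArow_len]; omega)]
          have hB : ((skill.foldl pvApplySkill board).getD i []).getD j 0 =
              (board.getD i []).getD j 0 + pvS skill i j := hBcell i j
          rw [hB]
          by_cases hjm : j < (board.headD []).length
          · rw [if_pos hjm]
            have : ((pvCal (skill.foldl pvPoint (List.replicate (board.length+1)
                (List.replicate ((board.headD []).length+1) (0:Int))))).getD i []).getD j 0 =
                pvS skill i j := hAcell i j (by omega) (by omega)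
            rw [this]
          · rw [if_neg hjm,
              pvS_zero_of_ge skill ((board.headD []).length)
                (fun s hs => (hskA s hs).2.2.2.2.2) i j (by omega), add_zero]
        exact ((List.getD_eq_getElem _ _ hj1).symm.trans key).trans (List.getD_eq_getElem _ _ hj2)
  rw [hEq, pv_count_eq, zero_add]
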